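-- pv_equiv track=rewrite | github.com/mgorm34/GlossWerk | archive/scripts/08_augment_training_data.py | decompose_compound
-- ===== SOURCE A (Python) =====
-- def decompose_compound(word):
--     """
--     Simple German compound word decomposition.
--     Tries splitting at various points and checks if parts are meaningful.
--     Returns list of potential sub-words (minimum 4 chars each).
--     """
--     word_lower = word.lower()
--     if len(word_lower) < 8:  # Too short to be a meaningful compound
--         return []
--
--     parts = []
--     min_part = 4
--
--     # Try splitting at each position
--     for i in range(min_part, len(word_lower) - min_part + 1):
--         left = word_lower[:i]
--         right = word_lower[i:]
--
--         # Handle linking elements (fugen-s, fugen-n, etc.)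
--         for fugen in ['', 's', 'n', 'en', 'er', 'es']:
--             if right.startswith(fugen) and len(right) > len(fugen) + min_part:
--                 remainder = right[len(fugen):]
--                 if len(left) >= min_part and len(remainder) >= min_part:
--                     parts.append(left)
--                     parts.append(remainder)
--
--     return list(set(parts))
-- ===== SOURCE B (Python) =====
-- def decompose_compound(word):
--     """Single-pass re-implementation: every part A can emit is just a prefix
--     w[:i] or a suffix w[i:] for i in 4..n-5, so collect exactly those; the
--     output is returned in sorted order (A's list(set(...)) order is arbitrary
--     hash order)."""
--     w = word.lower()
--     n = len(w)
--     if n < 8: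
--         return []
--     cands = set()
--     for i in range(4, n - 4):
--         cands.add(w[:i])
--         cands.add(w[i:])
--     return sorted(cands)
-- ===== Notes on version B (the rewrite author's own statement) =====
-- stated objective: simpler
-- what changed: B drops A's fugen inner loop and startswith checks entirely (they are provably redundant: every emitted part is exactly a prefix w[:i] or suffix w[i:] for 4 <= i <= n-5) and collects each prefix/suffix pair in one pass over the split points, returning the set sorted instead of in A's arbitrary hash order.
import Mathlib
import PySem

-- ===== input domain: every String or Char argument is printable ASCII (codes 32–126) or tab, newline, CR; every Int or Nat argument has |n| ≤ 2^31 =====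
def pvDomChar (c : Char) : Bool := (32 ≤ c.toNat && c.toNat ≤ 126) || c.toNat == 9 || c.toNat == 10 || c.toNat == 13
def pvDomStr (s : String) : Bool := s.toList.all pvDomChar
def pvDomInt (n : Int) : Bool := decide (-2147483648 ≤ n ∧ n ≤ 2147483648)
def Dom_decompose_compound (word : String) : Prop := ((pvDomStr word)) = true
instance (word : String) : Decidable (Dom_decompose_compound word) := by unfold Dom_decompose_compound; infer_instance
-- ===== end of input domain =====

-- B replaces A's split-point × fugen double loop by a single pass collecting each prefix
-- w[:i] and suffix w[i:] once (the fugen remainders are provably redundant); A's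
-- list(set(...)) hash order is not modelled, so both ports list the set in sorted order
-- (outputs are compared as sets) and B's Python returns sorted(cands) deterministically.

-- ===== PORT A =====
def pvFugenList : List (List Char) := [[], ['s'], ['n'], ['e', 'n'], ['e', 'r'], ['e', 's']]

def decompose_compound (word : String) : List String :=
  let word_lower : List Char := PySem.Chars.lower word.toList
  if PySem.List.len word_lower < 8 then []
  else
    let min_part : Int := 4
    let parts : List (List Char) :=
      (PySem.List.pyRange min_part (PySem.List.len word_lower - min_part + 1) 1).foldl
        (fun parts i =>
          let left := PySem.List.slice word_lower none (some i)
          let right := PySem.List.slice word_lower (some i) none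
          pvFugenList.foldl
            (fun parts fugen =>
              if PySem.Chars.startswith right fugen = true ∧
                  PySem.List.len right > PySem.List.len fugen + min_part then
                let remainder := PySem.List.slice right (some (PySem.List.len fugen)) none
                if PySem.List.len left ≥ min_part ∧ PySem.List.len remainder ≥ min_part then
                  (parts ++ [left]) ++ [remainder]
                else parts
              else parts)
            parts)
        []
    -- list(set(parts)): Python's set-iteration order is hash order (not modelled by PySem);
    -- the port lists the set's elements in (lexicographically) sorted order — outputs are
    -- compared as sets.
    (@PySem.List.sorted (List Char) (List Char) List.instLinearOrder.toLT
      LinearOrder.toDecidableLT (PySem.Set.ofList parts) (fun x => x) false).map String.ofList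

-- ===== PORT B =====
def decompose_compound_alt (word : String) : List String :=
  let w : List Char := PySem.Chars.lower word.toList
  let n : Int := PySem.List.len w
  if n < 8 then []
  else
    let cands : PySem.Set (List Char) :=
      (PySem.List.pyRange 4 (n - 4) 1).foldl
        (fun s i =>
          PySem.Set.add (PySem.Set.add s (PySem.List.slice w none (some i)))
            (PySem.List.slice w (some i) none))
        PySem.Set.empty
    -- sorted(cands): Python's sorted on ASCII strings = lexicographic order on the char lists
    (@PySem.List.sorted (List Char) (List Char) List.instLinearOrder.toLT
      LinearOrder.toDecidableLT cands (fun x => x) false).map String.ofList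

-- ===== PRECONDITION & SPEC =====
def Spec_decompose_compound (word : String) (out : List String) : Prop := out = decompose_compound_alt word
instance (word : String) (out : List String) : Decidable (Spec_decompose_compound word out) := by unfold Spec_decompose_compound; infer_instance

-- ===== CLAIM (what is proved, stated in full; the proofs are below) =====
def Claim_equal_decompose_compound : Prop := ∀ (word : String), Dom_decompose_compound word → Spec_decompose_compound word (decompose_compound word)

-- ===== LEMMAS AND PROOFS =====

-- What A's inner (fugen) loop appends for a given split point i.
def pvEmit (wl : List Char) (i : Int) (fugen : List Char) : List (List Char) :=
  if PySem.Chars.startswith (PySem.List.slice wl (some i) none) fugen = true ∧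
      PySem.List.len (PySem.List.slice wl (some i) none) > PySem.List.len fugen + 4 then
    if PySem.List.len (PySem.List.slice wl none (some i)) ≥ 4 ∧
        PySem.List.len (PySem.List.slice (PySem.List.slice wl (some i) none)
          (some (PySem.List.len fugen)) none) ≥ 4 then
      [PySem.List.slice wl none (some i),
       PySem.List.slice (PySem.List.slice wl (some i) none) (some (PySem.List.len fugen)) none]
    else []
  else []

lemma pvInnerFold (wl : List Char) (i : Int) (parts : List (List Char)) :
    pvFugenList.foldl
      (fun parts fugen =>
        if PySem.Chars.startswith (PySem.List.slice wl (some i) none) fugen = true ∧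
            PySem.List.len (PySem.List.slice wl (some i) none) > PySem.List.len fugen + 4 then
          if PySem.List.len (PySem.List.slice wl none (some i)) ≥ 4 ∧
              PySem.List.len (PySem.List.slice (PySem.List.slice wl (some i) none)
                (some (PySem.List.len fugen)) none) ≥ 4 then
            (parts ++ [PySem.List.slice wl none (some i)]) ++
              [PySem.List.slice (PySem.List.slice wl (some i) none)
                (some (PySem.List.len fugen)) none]
          else parts
        else parts)
      parts
    = parts ++ pvFugenList.flatMap (pvEmit wl i) := by
  have h :
      (fun (parts : List (List Char)) (fugen : List Char) =>
        if PySem.Chars.startswith (PySem.List.slice wl (some i) none) fugen = true ∧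
            PySem.List.len (PySem.List.slice wl (some i) none) > PySem.List.len fugen + 4 then
          if PySem.List.len (PySem.List.slice wl none (some i)) ≥ 4 ∧
              PySem.List.len (PySem.List.slice (PySem.List.slice wl (some i) none)
                (some (PySem.List.len fugen)) none) ≥ 4 then
            (parts ++ [PySem.List.slice wl none (some i)]) ++
              [PySem.List.slice (PySem.List.slice wl (some i) none)
                (some (PySem.List.len fugen)) none]
          else parts
        else parts)
      = fun parts fugen => parts ++ pvEmit wl i fugen := by
    funext parts fugen
    unfold pvEmit
    split_ifs <;> simp
  rw [h, PySem.List.foldl_append_eq_flatMap]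

-- A's parts list as a flatMap.
lemma pvPartsA (wl : List Char) :
    (PySem.List.pyRange 4 (PySem.List.len wl - 4 + 1) 1).foldl
      (fun parts i =>
        pvFugenList.foldl
          (fun parts fugen =>
            if PySem.Chars.startswith (PySem.List.slice wl (some i) none) fugen = true ∧
                PySem.List.len (PySem.List.slice wl (some i) none) > PySem.List.len fugen + 4 then
              if PySem.List.len (PySem.List.slice wl none (some i)) ≥ 4 ∧
                  PySem.List.len (PySem.List.slice (PySem.List.slice wl (some i) none)
                    (some (PySem.List.len fugen)) none) ≥ 4 then
                (parts ++ [PySem.List.slice wl none (some i)]) ++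
                  [PySem.List.slice (PySem.List.slice wl (some i) none)
                    (some (PySem.List.len fugen)) none]
              else parts
            else parts)
          parts)
      []
    = (PySem.List.pyRange 4 (PySem.List.len wl - 4 + 1) 1).flatMap
        (fun i => pvFugenList.flatMap (pvEmit wl i)) := by
  have h :
      (fun (parts : List (List Char)) (i : Int) =>
        pvFugenList.foldl
          (fun parts fugen =>
            if PySem.Chars.startswith (PySem.List.slice wl (some i) none) fugen = true ∧
                PySem.List.len (PySem.List.slice wl (some i) none) > PySem.List.len fugen + 4 then
              if PySem.List.len (PySem.List.slice wl none (some i)) ≥ 4 ∧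
                  PySem.List.len (PySem.List.slice (PySem.List.slice wl (some i) none)
                    (some (PySem.List.len fugen)) none) ≥ 4 then
                (parts ++ [PySem.List.slice wl none (some i)]) ++
                  [PySem.List.slice (PySem.List.slice wl (some i) none)
                    (some (PySem.List.len fugen)) none]
              else parts
            else parts)
          parts)
      = fun parts i => parts ++ pvFugenList.flatMap (pvEmit wl i) := by
    funext parts i
    exact pvInnerFold wl i parts
  rw [h, PySem.List.foldl_append_eq_flatMap]
  simp

-- Membership in A's parts: exactly the prefixes and suffixes at cut points 4 … n-5.
lemma pvMemA (wl : List Char) (x : List Char) :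
    (x ∈ (PySem.List.pyRange 4 (PySem.List.len wl - 4 + 1) 1).flatMap
        (fun i => pvFugenList.flatMap (pvEmit wl i)))
    ↔ ∃ j : Nat, 4 ≤ j ∧ (j : Int) ≤ PySem.List.len wl - 5 ∧
        (x = wl.take j ∨ x = wl.drop j) := by
  constructor
  · rintro hx
    rw [List.mem_flatMap] at hx
    obtain ⟨i, hi, hx⟩ := hx
    rw [PySem.List.mem_pyRange_one] at hi
    rw [List.mem_flatMap] at hx
    obtain ⟨fugen, hf, hx⟩ := hx
    unfold pvEmit at hx
    split_ifs at hx with h1 h2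
    · obtain ⟨hsw, hlen⟩ := h1
      have h0 : (0:Int) ≤ i := by omega
      obtain ⟨j, rfl⟩ := Int.eq_ofNat_of_zero_le h0
      simp only [PySem.List.len_eq, PySem.List.slice_from_natCast, List.length_drop] at hlen
      have hjn : j ≤ wl.length := by
        by_contra hgt
        rw [Nat.sub_eq_zero_of_le (Nat.le_of_lt (Nat.lt_of_not_le hgt))] at hlen
        simp at hlen
        omega
      rw [Nat.cast_sub hjn] at hlen
      simp only [PySem.List.len_eq, PySem.List.slice_to_natCast, PySem.List.slice_from_natCast,
        List.mem_cons, List.not_mem_nil, or_false] at hx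
      rcases hx with rfl | rfl
      · refine ⟨j, by exact_mod_cast hi.1, ?_, Or.inl rfl⟩
        simp only [PySem.List.len_eq]
        omega
      · refine ⟨j + fugen.length, ?_, ?_, Or.inr ?_⟩
        · have := hi.1
          omega
        · simp only [PySem.List.len_eq]
          omega
        · rw [List.drop_drop, Nat.add_comm]
    · exact absurd hx (List.not_mem_nil)
    · exact absurd hx (List.not_mem_nil)
  · rintro ⟨j, hj4, hjn, hx⟩
    simp only [PySem.List.len_eq] at hjn
    have hjn' : j + 5 ≤ wl.length := by omega
    rw [List.mem_flatMap]
    refine ⟨(j : Int), ?_, ?_⟩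
    · rw [PySem.List.mem_pyRange_one]
      refine ⟨by exact_mod_cast hj4, ?_⟩
      simp only [PySem.List.len_eq]
      omega
    · rw [List.mem_flatMap]
      refine ⟨[], by simp [pvFugenList], ?_⟩
      unfold pvEmit
      rw [if_pos, if_pos]
      · have hz : PySem.List.len ([] : List Char) = 0 := by simp
        rw [hz, PySem.List.slice_zero_start, PySem.List.slice_none_none]
        simp only [PySem.List.slice_to_natCast, PySem.List.slice_from_natCast, List.mem_cons,
          List.not_mem_nil, or_false]
        tauto
      · refine ⟨?_, ?_⟩
        · simp only [PySem.List.len_eq, PySem.List.slice_to_natCast, List.length_take]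
          omega
        · have hz : PySem.List.len ([] : List Char) = 0 := by simp
          rw [hz, PySem.List.slice_zero_start, PySem.List.slice_none_none]
          simp only [PySem.List.len_eq, PySem.List.slice_from_natCast, List.length_drop]
          omega
      · refine ⟨?_, ?_⟩
        · rw [PySem.Chars.startswith_iff]
          exact List.nil_prefix
        · simp only [PySem.List.len_eq, PySem.List.slice_from_natCast, List.length_drop,
            List.length_nil]
          omega

-- Membership in B's set-building fold.
lemma pvMemFoldAdd2 (l : List Int) (f g : Int → List Char) (s : PySem.Set (List Char))
    (x : List Char) :
    (x ∈ l.foldl (fun s i => PySem.Set.add (PySem.Set.add s (f i)) (g i)) s)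
    ↔ x ∈ s ∨ ∃ i ∈ l, x = f i ∨ x = g i := by
  induction l generalizing s with
  | nil => simp
  | cons a t ih =>
    simp only [List.foldl_cons, ih, PySem.Set.mem_add, List.mem_cons]
    constructor
    · rintro (((h | rfl) | rfl) | ⟨i, hi, h⟩)
      · exact Or.inl h
      · exact Or.inr ⟨a, Or.inl rfl, Or.inl rfl⟩
      · exact Or.inr ⟨a, Or.inl rfl, Or.inr rfl⟩
      · exact Or.inr ⟨i, Or.inr hi, h⟩
    · rintro (h | ⟨i, hi | hi, h⟩)
      · exact Or.inl (Or.inl (Or.inl h))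
      · subst hi
        rcases h with rfl | rfl
        · exact Or.inl (Or.inl (Or.inr rfl))
        · exact Or.inl (Or.inr rfl)
      · exact Or.inr ⟨i, hi, h⟩

-- B's fold keeps the set Nodup.
lemma pvNodupFoldAdd2 (l : List Int) (f g : Int → List Char) (s : PySem.Set (List Char))
    (hs : s.Nodup) :
    (l.foldl (fun s i => PySem.Set.add (PySem.Set.add s (f i)) (g i)) s).Nodup := by
  induction l generalizing s with
  | nil => exact hs
  | cons a t ih =>
    exact ih _ (PySem.Set.nodup_add _ _ (PySem.Set.nodup_add _ _ hs))

-- ===== VERDICT (by name: the statement is the Claim_ definition above) =====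
theorem decompose_compound_spec : Claim_equal_decompose_compound := by
  intro word _hdom
  unfold Spec_decompose_compound decompose_compound decompose_compound_alt
  set wl : List Char := PySem.Chars.lower word.toList with hwl
  by_cases h8 : PySem.List.len wl < 8
  · rw [if_pos h8, if_pos h8]
  · rw [if_neg h8, if_neg h8]
    refine congrArg (List.map String.ofList) ?_
    refine PySem.List.sorted_eq_sorted_of_perm _ _ _ (fun _ _ h => h) ?_
    refine (List.perm_ext_iff_of_nodup ?_ ?_).mpr ?_
    · exact PySem.Set.nodup_ofList _
    · exact pvNodupFoldAdd2 _ (fun i => PySem.List.slice wl none (some i))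
        (fun i => PySem.List.slice wl (some i) none) _ List.nodup_nil
    intro x
    rw [PySem.Set.mem_ofList, pvPartsA, pvMemA]
    rw [pvMemFoldAdd2 (PySem.List.pyRange 4 (PySem.List.len wl - 4) 1)
      (fun i => PySem.List.slice wl none (some i))
      (fun i => PySem.List.slice wl (some i) none) PySem.Set.empty x]
    simp only [PySem.Set.empty, List.not_mem_nil, false_or]
    constructor
    · rintro ⟨j, hj4, hjn, hx⟩
      simp only [PySem.List.len_eq] at hjn
      refine ⟨(j : Int), ?_, ?_⟩
      · rw [PySem.List.mem_pyRange_one]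
        refine ⟨by exact_mod_cast hj4, ?_⟩
        simp only [PySem.List.len_eq]
        omega
      · rcases hx with rfl | rfl
        · exact Or.inl (by rw [PySem.List.slice_to_natCast])
        · exact Or.inr (by rw [PySem.List.slice_from_natCast])
    · rintro ⟨i, hi, hx⟩
      rw [PySem.List.mem_pyRange_one] at hi
      have h0 : (0:Int) ≤ i := by omega
      obtain ⟨j, rfl⟩ := Int.eq_ofNat_of_zero_le h0
      refine ⟨j, by exact_mod_cast hi.1, ?_, ?_⟩
      · have := hi.2
        simp only [PySem.List.len_eq] at this ⊢
        omega
      · rcases hx with rfl | rfl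
        · exact Or.inl (by rw [PySem.List.slice_to_natCast])
        · exact Or.inr (by rw [PySem.List.slice_from_natCast])
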